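-- pv_equiv track=rewrite | github.com/UppsalaIM/rice | cnp/tools/generate_valences.py | makeAllValences
-- ===== SOURCE A (Python) =====
-- def makeBitToInOut(b):
--     if b=='0':
--         return 'in'
--     elif b=='1':
--         return 'out'
--     else:
--         raise Exception('Not valid bit')
--
-- def makeAllValences(argNames):
--     n = len(argNames)
--     u = pow(2, n)
--     allModes = list()
--     for i in range(0, u):
--         ubin = format(i, "b")
--         ubinpadded = ('0')*(n-len(ubin)) + ubin
--         modes = list(ubinpadded)
--         modesStr = list(map(makeBitToInOut, modes))
--         modesWithArgNames = dict(zip(argNames, modesStr))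
--         allModes.append(modesWithArgNames)
--     return allModes
-- ===== SOURCE B (Python) =====
-- def makeAllValences(argNames):
--     result = [{}]
--     for arg in argNames:
--         result = [{**d, arg: m} for d in result for m in ('in', 'out')]
--     return result
-- ===== Notes on version B (the rewrite author's own statement) =====
-- stated objective: simpler
-- what changed: Replaces A's single loop over all 2^n integers with binary formatting, zero-padding and per-bit decoding by n incremental doubling passes that extend every partial dict with arg:'in' / arg:'out', dropping makeBitToInOut and all string/bit arithmetic.
import Mathlib
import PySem

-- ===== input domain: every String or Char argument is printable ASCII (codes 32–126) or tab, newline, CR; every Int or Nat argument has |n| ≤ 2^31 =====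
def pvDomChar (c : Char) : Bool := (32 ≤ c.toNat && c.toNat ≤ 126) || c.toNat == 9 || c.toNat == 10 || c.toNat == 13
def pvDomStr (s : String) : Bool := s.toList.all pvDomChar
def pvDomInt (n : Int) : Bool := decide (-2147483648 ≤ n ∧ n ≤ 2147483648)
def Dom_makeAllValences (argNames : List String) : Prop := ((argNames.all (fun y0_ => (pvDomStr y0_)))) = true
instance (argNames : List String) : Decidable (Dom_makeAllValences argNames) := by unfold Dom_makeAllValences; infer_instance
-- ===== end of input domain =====

-- B replaces A's single loop over 2^n integers (binary format + zero-padding + bit decoding)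
-- by n doubling passes that extend every partial dict with arg↦'in' / arg↦'out'; objective: simpler.

-- ===== PORT A =====
-- the 'raise' branch is unreachable here: format(i, 'b') of i ≥ 0 yields only '0'/'1' digits;
-- ported with a dummy "" on that branch (never taken on any input of the port's use).
def makeBitToInOut (b : Char) : String :=
  if b = '0' then "in" else if b = '1' then "out" else ""

def makeAllValences (argNames : List String) : List (List (String × String)) :=
  let n : Int := PySem.List.len argNames
  let u : Int := 2 ^ n.toNat   -- pow(2, n); exact since n = len(argNames) ≥ 0
  (PySem.List.pyRange 0 u 1).foldl (fun allModes i =>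
    let ubin : String := PySem.Int.toBin i
    -- ('0')*(n-len(ubin)) + ubin : Python's str*k is empty for k ≤ 0, matching Int.toNat
    let ubinpadded : String := String.ofList (List.replicate (n - PySem.Str.len ubin).toNat '0' ++ ubin.toList)
    let modes : List Char := ubinpadded.toList
    let modesStr : List String := modes.map makeBitToInOut
    let modesWithArgNames : List (String × String) := (PySem.Dict.ofList (argNames.zip modesStr)).items
    allModes ++ [modesWithArgNames]) []

-- ===== PORT B =====
def makeAllValences_alt (argNames : List String) : List (List (String × String)) :=
  (argNames.foldl
    (fun result arg => result.flatMap (fun d => [d.insert arg "in", d.insert arg "out"]))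
    ([PySem.Dict.empty] : List (PySem.Dict String String))).map PySem.Dict.items

-- ===== PRECONDITION & SPEC =====
def Spec_makeAllValences (argNames : List String) (out : List (List (String × String))) : Prop := out = makeAllValences_alt argNames
instance (argNames : List String) (out : List (List (String × String))) : Decidable (Spec_makeAllValences argNames out) := by unfold Spec_makeAllValences; infer_instance

-- ===== CLAIM (what is proved, stated in full; the proofs are below) =====
def Claim_equal_makeAllValences : Prop := ∀ (argNames : List String), Dom_makeAllValences argNames → Spec_makeAllValences argNames (makeAllValences argNames)

-- ===== LEMMAS AND PROOFS =====

-- binary digits of n, most significant first (= format(n, 'b') for n ≥ 0)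
def pvBits (n : Nat) : List Char :=
  if n < 2 then [Nat.digitChar n]
  else pvBits (n / 2) ++ [Nat.digitChar (n % 2)]
decreasing_by exact Nat.div_lt_self (by omega) (by omega)

-- pvBits n left-padded with '0' to width m (Python's '0'*(m-len) + bits)
def pvPad (m k : Nat) : List Char := List.replicate (m - (pvBits k).length) '0' ++ pvBits k

-- all in/out mode rows for a list of args, first arg most significant, 'in' before 'out'
def pvProd : List String → List (List String)
  | [] => [[]]
  | _ :: r => (pvProd r).map ("in" :: ·) ++ (pvProd r).map ("out" :: ·)

lemma pvBits_lt_two (n : Nat) (h : n < 2) : pvBits n = [Nat.digitChar n] := by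
  rw [pvBits]; simp [h]

lemma pvBits_ge_two (n : Nat) (h : ¬ n < 2) :
    pvBits n = pvBits (n / 2) ++ [Nat.digitChar (n % 2)] := by
  rw [pvBits]; simp [h]

lemma pvBits_len_le (k : Nat) : ∀ (m : Nat), 1 ≤ m → k < 2 ^ m → (pvBits k).length ≤ m := by
  induction k using Nat.strong_induction_on with
  | _ k ih =>
    intro m hm hk
    by_cases h2 : k < 2
    · rw [pvBits_lt_two k h2]; simpa using hm
    · rw [pvBits_ge_two k h2]
      have hm2 : 2 ≤ m := by
        by_contra hc
        have : m = 1 := by omega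
        subst this; simp at hk; omega
      have hpow : 2 ^ m = 2 * 2 ^ (m - 1) := by
        conv_lhs => rw [show m = 1 + (m - 1) by omega]
        rw [pow_add, pow_one]
      have := ih (k / 2) (Nat.div_lt_self (by omega) (by omega)) (m - 1) (by omega) (by omega)
      simp only [List.length_append, List.length_singleton]
      omega

lemma pvPad_step (m k : Nat) (hm : 1 ≤ m) :
    pvPad (m + 1) k = pvPad m (k / 2) ++ [Nat.digitChar (k % 2)] := by
  by_cases h2 : k < 2
  · have hk2 : k / 2 = 0 := by omega
    have hkm : k % 2 = k := by omega
    rw [pvPad, pvPad, hk2, hkm, pvBits_lt_two k h2, pvBits_lt_two 0 (by omega)]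
    simp only [List.length_singleton]
    rw [show m + 1 - 1 = (m - 1) + 1 by omega, List.replicate_succ']
    simp [Nat.digitChar]
  · rw [pvPad, pvPad, pvBits_ge_two k h2]
    simp only [List.length_append, List.length_singleton]
    rw [show m + 1 - ((pvBits (k / 2)).length + 1) = m - (pvBits (k / 2)).length by omega]
    simp [List.append_assoc]

lemma pvBits_hi (j : Nat) : ∀ (k : Nat), k < 2 ^ (j + 1) →
    pvBits (2 ^ (j + 1) + k) = '1' :: pvPad (j + 1) k := by
  induction j with
  | zero =>
    intro k hk
    interval_cases k
    · rw [show 2 ^ (0 + 1) + 0 = 2 by norm_num, pvBits_ge_two 2 (by omega)]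
      rw [show (2 : Nat) / 2 = 1 from rfl, pvBits_lt_two 1 (by omega), pvPad,
        pvBits_lt_two 0 (by omega)]
      rfl
    · rw [show 2 ^ (0 + 1) + 1 = 3 by norm_num, pvBits_ge_two 3 (by omega)]
      rw [show (3 : Nat) / 2 = 1 from rfl, pvBits_lt_two 1 (by omega), pvPad,
        pvBits_lt_two 1 (by omega)]
      rfl
  | succ j ih =>
    intro k hk
    have hpow : 2 ^ (j + 1 + 1) = 2 * 2 ^ (j + 1) := by
      rw [pow_succ, Nat.mul_comm]
    have hge : ¬ 2 ^ (j + 1 + 1) + k < 2 := by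
      have : 2 ≤ 2 ^ (j + 1 + 1) := Nat.one_lt_two_pow (by omega)
      omega
    rw [pvBits_ge_two _ hge]
    have hdiv : (2 ^ (j + 1 + 1) + k) / 2 = 2 ^ (j + 1) + k / 2 := by omega
    have hmod : (2 ^ (j + 1 + 1) + k) % 2 = k % 2 := by omega
    rw [hdiv, hmod, ih (k / 2) (by omega)]
    rw [pvPad_step (j + 1) k (by omega)]
    rfl

lemma pvPad_len (m k : Nat) (hm : 1 ≤ m) (hk : k < 2 ^ m) : (pvPad m k).length = m := by
  have := pvBits_len_le k m hm hk
  simp only [pvPad, List.length_append, List.length_replicate]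
  omega

lemma pvPad_lo (m k : Nat) (hm : 1 ≤ m) (hk : k < 2 ^ m) :
    pvPad (m + 1) k = '0' :: pvPad m k := by
  have hle := pvBits_len_le k m hm hk
  rw [pvPad, pvPad, show m + 1 - (pvBits k).length = (m - (pvBits k).length) + 1 by omega,
    List.replicate_succ]
  rfl

lemma pvPad_hi (m k : Nat) (hm : 1 ≤ m) (hk : k < 2 ^ m) :
    pvPad (m + 1) (2 ^ m + k) = '1' :: pvPad m k := by
  obtain ⟨j, rfl⟩ : ∃ j, m = j + 1 := ⟨m - 1, by omega⟩
  have hb := pvBits_hi j k hk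
  rw [pvPad, hb]
  have hlen : ('1' :: pvPad (j + 1) k).length = j + 2 := by
    simp [pvPad_len (j + 1) k (by omega) hk]
  rw [show ('1' :: pvPad (j + 1) k : List Char).length = j + 2 from hlen]
  simp

-- fuel-independent characterisation of Nat.toDigitsCore in base 2
lemma pvToDigitsCore_eq (n : Nat) : ∀ (f : Nat) (l : List Char), n < f →
    Nat.toDigitsCore 2 f n l = pvBits n ++ l := by
  induction n using Nat.strong_induction_on with
  | _ n ih =>
    intro f l hf
    match f with
    | 0 => omega
    | f + 1 =>
      rw [Nat.toDigitsCore]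
      by_cases h2 : n < 2
      · have : n / 2 = 0 := by omega
        simp only [this, if_true]
        rw [pvBits_lt_two n h2, show n % 2 = n by omega]
        rfl
      · have hne : ¬ n / 2 = 0 := by omega
        simp only [hne, if_false]
        have hlt : n / 2 < n := Nat.div_lt_self (by omega) (by omega)
        rw [ih (n / 2) hlt f (Nat.digitChar (n % 2) :: l) (by omega)]
        rw [pvBits_ge_two n h2]
        simp

lemma pvToBin_toList (k : Nat) : (PySem.Int.toBin (k : Int)).toList = pvBits k := by
  rw [PySem.Int.toList_toBin, PySem.Int.toBinChars]
  simp only [show ¬ ((k : Int) < 0) by omega, if_false, Int.toNat_natCast]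
  rw [Nat.toDigits, pvToDigitsCore_eq k (k + 1) [] (by omega)]
  simp

lemma pvZip_lo (a : String) (args : List String) (k : Nat) (hk : k < 2 ^ args.length) :
    (a :: args).zip ((pvPad (args.length + 1) k).map makeBitToInOut)
    = (a, "in") :: args.zip ((pvPad args.length k).map makeBitToInOut) := by
  match args with
  | [] =>
    have : k = 0 := by simpa using hk
    subst this
    rw [show ([] : List String).length + 1 = 1 from rfl, pvPad, pvBits_lt_two 0 (by omega)]
    rfl
  | b :: r =>
    rw [pvPad_lo _ k (by simp) hk]
    rfl

lemma pvZip_hi (a : String) (args : List String) (k : Nat) (hk : k < 2 ^ args.length) :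
    (a :: args).zip ((pvPad (args.length + 1) (2 ^ args.length + k)).map makeBitToInOut)
    = (a, "out") :: args.zip ((pvPad args.length k).map makeBitToInOut) := by
  match args with
  | [] =>
    have : k = 0 := by simpa using hk
    subst this
    rw [show ([] : List String).length + 1 = 1 from rfl,
      show 2 ^ ([] : List String).length + 0 = 1 from rfl, pvPad, pvBits_lt_two 1 (by omega)]
    rfl
  | b :: r =>
    rw [pvPad_hi _ k (by simp) hk]
    rfl

lemma pvDictUpdate_cons {κ ν : Type} [BEq κ] (d : PySem.Dict κ ν) (p : κ × ν) (ps : List (κ × ν)) :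
    d.update (p :: ps) = (d.insert p.1 p.2).update ps := rfl

lemma pvCoreA (args : List String) (d : PySem.Dict String String) :
    (List.range (2 ^ args.length)).map
      (fun k => d.update (args.zip ((pvPad args.length k).map makeBitToInOut)))
    = (pvProd args).map (fun ms => d.update (args.zip ms)) := by
  induction args generalizing d with
  | nil => simp [pvProd, PySem.Dict.update]
  | cons a args ih =>
    have hsplit : 2 ^ (a :: args).length = 2 ^ args.length + 2 ^ args.length := by
      simp [List.length_cons, pow_succ, Nat.mul_two]
    rw [hsplit, List.range_add, List.map_append, List.map_map]
    have hlo : (List.range (2 ^ args.length)).map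
        (fun k => d.update ((a :: args).zip ((pvPad (a :: args).length k).map makeBitToInOut)))
        = (List.range (2 ^ args.length)).map
          (fun k => (d.insert a "in").update (args.zip ((pvPad args.length k).map makeBitToInOut))) := by
      apply List.map_congr_left
      intro k hkmem
      have hk := List.mem_range.mp hkmem
      rw [show (a :: args).length = args.length + 1 from rfl, pvZip_lo a args k hk,
        pvDictUpdate_cons]
    have hhi : (List.range (2 ^ args.length)).map
        ((fun k => d.update ((a :: args).zip ((pvPad (a :: args).length k).map makeBitToInOut)))
          ∘ (fun x => 2 ^ args.length + x))
        = (List.range (2 ^ args.length)).map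
          (fun k => (d.insert a "out").update (args.zip ((pvPad args.length k).map makeBitToInOut))) := by
      apply List.map_congr_left
      intro k hkmem
      have hk := List.mem_range.mp hkmem
      simp only [Function.comp_apply]
      rw [show (a :: args).length = args.length + 1 from rfl, pvZip_hi a args k hk,
        pvDictUpdate_cons]
    rw [hlo, hhi, ih (d.insert a "in"), ih (d.insert a "out")]
    simp only [pvProd, List.map_append, List.map_map]
    congr 1

lemma pvFoldlAppendMap {α β : Type} (f : α → β) (l : List α) (acc : List β) :
    l.foldl (fun acc x => acc ++ [f x]) acc = acc ++ l.map f := by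
  induction l generalizing acc with
  | nil => simp
  | cons x l ih => simp [List.foldl_cons, ih]

lemma pvA_eq (args : List String) :
    makeAllValences args
    = ((pvProd args).map (fun ms => PySem.Dict.ofList (args.zip ms))).map PySem.Dict.items := by
  simp only [makeAllValences]
  rw [pvFoldlAppendMap, List.nil_append, PySem.List.pyRange_one, List.map_map]
  have hN : ((2 : Int) ^ (PySem.List.len args).toNat - 0).toNat = 2 ^ args.length := by
    have h1 : (PySem.List.len args).toNat = args.length := by simp [PySem.List.len]
    have h2 : ((2 : Int) ^ args.length) = ((2 ^ args.length : Nat) : Int) := by push_cast; ring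
    rw [h1, sub_zero, h2, Int.toNat_natCast]
  rw [hN]
  have hmain : (List.range (2 ^ args.length)).map
      (fun k => PySem.Dict.ofList (args.zip ((pvPad args.length k).map makeBitToInOut)))
      = (pvProd args).map (fun ms => PySem.Dict.ofList (args.zip ms)) := by
    simpa only [PySem.Dict.ofList] using pvCoreA args PySem.Dict.empty
  rw [← hmain, List.map_map]
  apply List.map_congr_left
  intro k hkmem
  simp only [Function.comp_apply, zero_add]
  have hlist : (String.ofList (List.replicate
        ((PySem.List.len args - PySem.Str.len (PySem.Int.toBin (k : Int))).toNat) '0'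
      ++ (PySem.Int.toBin (k : Int)).toList)).toList = pvPad args.length k := by
    rw [String.toList_ofList, pvToBin_toList k]
    have hlen : PySem.Str.len (PySem.Int.toBin (k : Int)) = ((pvBits k).length : Int) := by
      have hb : (PySem.Int.toBin (k : Int)).toList = pvBits k := pvToBin_toList k
      simp [PySem.Str.len, ← hb]
    rw [hlen]
    have ht : ((PySem.List.len args : Int) - ((pvBits k).length : Int)).toNat
        = args.length - (pvBits k).length := by
      simp only [PySem.List.len]; omega
    rw [ht]
    rfl
  rw [hlist]

lemma pvCoreB (args : List String) (L : List (PySem.Dict String String)) :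
    args.foldl (fun result arg => result.flatMap (fun d => [d.insert arg "in", d.insert arg "out"])) L
    = L.flatMap (fun d => (pvProd args).map (fun ms => d.update (args.zip ms))) := by
  induction args generalizing L with
  | nil =>
    simp [pvProd, PySem.Dict.update]
  | cons a args ih =>
    rw [List.foldl_cons, ih, List.flatMap_assoc]
    congr 1
    funext d
    simp only [List.flatMap_cons, List.flatMap_nil, List.append_nil, pvProd,
      List.map_append, List.map_map]
    congr 1

lemma pvB_eq (args : List String) :
    makeAllValences_alt args
    = ((pvProd args).map (fun ms => PySem.Dict.ofList (args.zip ms))).map PySem.Dict.items := by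
  unfold makeAllValences_alt
  rw [pvCoreB]
  simp [PySem.Dict.ofList]

-- ===== VERDICT (by name: the statement is the Claim_ definition above) =====
theorem makeAllValences_spec : Claim_equal_makeAllValences := by
  intro args _
  show makeAllValences args = makeAllValences_alt args
  rw [pvA_eq, pvB_eq]
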